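-- pv_equiv track=rewrite | github.com/monadosorin/metnum | kalkulator.py | check_e_usage
-- ===== SOURCE A (Python) =====
-- def check_e_usage(rumus):
--     r = rumus.replace(" ", "")
--     operators = "+-*/^"
--     n = len(r)
--
--     for i in range(n):
--         if r[i] == "e":
--             if i > 0:
--                 kiri = r[i - 1]
--                 if kiri.isdigit() or kiri == ")" or kiri == "t" or kiri == "e":
--                     return False
--             if i < n - 1:
--                 kanan = r[i + 1]
--                 if kanan == "^":
--                     continue
--                 if kanan.isdigit() or kanan == "t" or kanan == "e":
--                     return False
--     return True
-- ===== SOURCE B (Python) =====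
-- def check_e_usage(rumus):
--     # Split the cleaned formula on 'e': each occurrence of 'e' becomes a boundary
--     # between two e-free segments; validate the character context at each boundary.
--     parts = rumus.replace(" ", "").split("e")
--     m = len(parts)
--     for i in range(1, m):
--         prev, cur = parts[i - 1], parts[i]
--         if prev:
--             c = prev[-1]
--             if c.isdigit() or c in ")t":
--                 return False
--         elif i > 1:  # empty segment between two e's: left neighbour is 'e'
--             return False
--         if cur:
--             c = cur[0]
--             if c != "^" and (c.isdigit() or c == "t"):
--                 return False
--         elif i < m - 1:  # empty segment before another 'e': right neighbour is 'e'
--             return False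
--     return True
-- ===== Notes on version B (the rewrite author's own statement) =====
-- stated objective: alternative
-- what changed: Instead of scanning every character and inspecting the neighbours of each 'e', B splits the cleaned string on 'e' into e-free segments and validates the left/right context of each 'e' boundary from the last/first characters of adjacent segments (empty segments encode adjacent e's).
import Mathlib
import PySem

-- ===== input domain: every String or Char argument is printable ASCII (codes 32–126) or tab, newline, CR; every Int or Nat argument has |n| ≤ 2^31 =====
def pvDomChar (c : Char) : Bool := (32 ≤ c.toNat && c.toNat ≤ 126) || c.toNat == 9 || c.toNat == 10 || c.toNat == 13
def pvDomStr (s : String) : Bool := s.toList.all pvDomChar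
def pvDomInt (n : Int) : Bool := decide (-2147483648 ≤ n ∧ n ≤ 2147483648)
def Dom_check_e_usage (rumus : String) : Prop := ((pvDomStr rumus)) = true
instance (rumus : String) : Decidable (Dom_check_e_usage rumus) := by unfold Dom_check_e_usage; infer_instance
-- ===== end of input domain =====

-- B replaces A's per-character neighbour scan by splitting the cleaned string on 'e'
-- and validating the segment boundaries (alternative decomposition; same return value).

-- ===== PORT A =====
-- literal port of A's index loop over range(n) with early return; r[i] is always
-- in range (0 ≤ i < n), so pyGetD's default is unreachable
def pvLoopA (r : List Char) (n : Int) : List Int → Bool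
  | [] => true
  | i :: rest =>
    if PySem.List.pyGetD r i ' ' == 'e' then
      if decide (0 < i) &&
          (let kiri := PySem.List.pyGetD r (i - 1) ' '
           PySem.Chars.isdigit kiri || kiri == ')' || kiri == 't' || kiri == 'e') then
        false
      else if decide (i < n - 1) then
        let kanan := PySem.List.pyGetD r (i + 1) ' '
        if kanan == '^' then pvLoopA r n rest
        else if PySem.Chars.isdigit kanan || kanan == 't' || kanan == 'e' then false
        else pvLoopA r n rest
      else pvLoopA r n rest
    else pvLoopA r n rest

def check_e_usage (rumus : String) : Bool :=
  let r := (PySem.Str.replace rumus " " "").toList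
  let n : Int := r.length
  pvLoopA r n (PySem.List.pyRange 0 n 1)

-- ===== PORT B =====
-- Source B's left-context check for the segment before an 'e' (atStart: that 'e' is the first one)
def pvLeftBadSeg (p : List Char) (atStart : Bool) : Bool :=
  match p.getLast? with
  | some c => PySem.Chars.isdigit c || c == ')' || c == 't'
  | none => !atStart
-- Source B's right-context check for the segment after an 'e' (more: further 'e's follow)
def pvRightBadSeg (q : List Char) (more : Bool) : Bool :=
  match q.head? with
  | some c => c != '^' && (PySem.Chars.isdigit c || c == 't')
  | none => more
-- Source B's loop over consecutive split segments, as structural recursion over the same state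
def pvOkB : List Char → List (List Char) → Bool → Bool
  | _, [], _ => true
  | p, q :: qs, atStart =>
    !pvLeftBadSeg p atStart && !pvRightBadSeg q (!qs.isEmpty) && pvOkB q qs false

def check_e_usage_alt (rumus : String) : Bool :=
  let parts := PySem.Chars.splitOn (PySem.Str.replace rumus " " "").toList ['e']
  -- split never returns [], so the headD default is unreachable
  pvOkB (parts.headD []) parts.tail true

-- ===== PRECONDITION & SPEC =====
def Spec_check_e_usage (rumus : String) (out : Bool) : Prop := out = check_e_usage_alt rumus
instance (rumus : String) (out : Bool) : Decidable (Spec_check_e_usage rumus out) := by unfold Spec_check_e_usage; infer_instance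

-- ===== CLAIM (what is proved, stated in full; the proofs are below) =====
def Claim_equal_check_e_usage : Prop := ∀ (rumus : String), Dom_check_e_usage rumus → Spec_check_e_usage rumus (check_e_usage rumus)

-- ===== LEMMAS AND PROOFS =====

-- full left/right-context badness of an 'e' (as characters, including 'e' itself)
def pvBadLeft (c : Char) : Bool := PySem.Chars.isdigit c || c == ')' || c == 't' || c == 'e'
def pvBadRight (c : Char) : Bool := PySem.Chars.isdigit c || c == 't' || c == 'e'

def pvBadPair : Option Char → Char → Bool
  | none, _ => false
  | some a, b => (b == 'e' && pvBadLeft a) || (a == 'e' && pvBadRight b)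

-- pair-chain scan with the previous character as context
def pvNoBad : Option Char → List Char → Bool
  | _, [] => true
  | prev, c :: t => !pvBadPair prev c && pvNoBad (some c) t

def pvLastBad (p : List Char) : Bool :=
  match p.getLast? with
  | some c => pvBadLeft c
  | none => false

-- 'e' :: q₁ ++ 'e' :: q₂ ++ … : the part of the string after the first split segment
def pvInterE : List (List Char) → List Char
  | [] => []
  | q :: qs => 'e' :: (q ++ pvInterE qs)

-- ---------- A-side: A's loop = pvNoBad none r ----------

-- the condition on which A's loop returns False at index i (A's branch structure verbatim)
def pvTrig (r : List Char) (n i : Int) : Bool :=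
  if PySem.List.pyGetD r i ' ' == 'e' then
    if decide (0 < i) &&
        (PySem.Chars.isdigit (PySem.List.pyGetD r (i - 1) ' ') ||
         PySem.List.pyGetD r (i - 1) ' ' == ')' || PySem.List.pyGetD r (i - 1) ' ' == 't' ||
         PySem.List.pyGetD r (i - 1) ' ' == 'e') then
      true
    else if decide (i < n - 1) then
      if PySem.List.pyGetD r (i + 1) ' ' == '^' then false
      else if PySem.Chars.isdigit (PySem.List.pyGetD r (i + 1) ' ') ||
          PySem.List.pyGetD r (i + 1) ' ' == 't' || PySem.List.pyGetD r (i + 1) ' ' == 'e' then true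
      else false
    else false
  else false

lemma pvLoopA_cons (r : List Char) (n i : Int) (rest : List Int) :
    pvLoopA r n (i :: rest) = (!pvTrig r n i && pvLoopA r n rest) := by
  simp only [pvLoopA, pvTrig]
  by_cases h1 : (PySem.List.pyGetD r i ' ' == 'e') = true <;>
    simp only [h1, Bool.false_eq_true, if_false, if_pos] <;>
    [skip; simp]
  by_cases h2 : (decide (0 < i) &&
      (PySem.Chars.isdigit (PySem.List.pyGetD r (i - 1) ' ') ||
       PySem.List.pyGetD r (i - 1) ' ' == ')' || PySem.List.pyGetD r (i - 1) ' ' == 't' ||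
       PySem.List.pyGetD r (i - 1) ' ' == 'e')) = true <;>
    simp only [h2, Bool.false_eq_true, if_false, if_pos] <;>
    [simp; skip]
  by_cases h3 : (decide (i < n - 1)) = true <;>
    simp only [h3, Bool.false_eq_true, if_false, if_pos] <;>
    [skip; simp]
  by_cases h4 : (PySem.List.pyGetD r (i + 1) ' ' == '^') = true <;>
    simp only [h4, Bool.false_eq_true, if_false, if_pos] <;>
    [simp; skip]
  by_cases h5 : (PySem.Chars.isdigit (PySem.List.pyGetD r (i + 1) ' ') ||
      PySem.List.pyGetD r (i + 1) ' ' == 't' || PySem.List.pyGetD r (i + 1) ' ' == 'e') = true <;>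
    simp [h5]

lemma pvLoopA_eq_any (r : List Char) (n : Int) (l : List Int) :
    pvLoopA r n l = !(l.any (pvTrig r n)) := by
  induction l with
  | nil => rfl
  | cons i rest ih => rw [pvLoopA_cons, ih, List.any_cons]; cases pvTrig r n i <;> simp

lemma pvBadRight_ne_caret {c : Char} (h : pvBadRight c = true) : c ≠ '^' := by
  rintro rfl; revert h; decide

-- pvTrig over Nat-indexed getD, on in-range Int indices
lemma pvTrig_iff (r : List Char) (i : Int) (h0 : 0 ≤ i) (hn : i < (r.length : Int)) :
    pvTrig r r.length i = true ↔
      (r.getD i.toNat ' ' = 'e' ∧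
        ((0 < i.toNat ∧ pvBadLeft (r.getD (i.toNat - 1) ' ')) ∨
         (i.toNat + 1 < r.length ∧ r.getD (i.toNat + 1) ' ' ≠ '^' ∧
            pvBadRight (r.getD (i.toNat + 1) ' ')))) := by
  have g0 : PySem.List.pyGetD r i ' ' = r.getD i.toNat ' ' := by
    rw [PySem.List.pyGetD_eq_getElem r ' ' h0 hn,
        List.getD_eq_getElem r ' ' (by omega : i.toNat < r.length)]
  constructor
  · intro htrig
    unfold pvTrig at htrig
    split_ifs at htrig with h1 h2 h3 h4 h5 <;> try simp at htrig
    · -- left-context violation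
      simp only [Bool.and_eq_true, decide_eq_true_eq] at h2
      obtain ⟨hi0, hbad⟩ := h2
      have gm : PySem.List.pyGetD r (i - 1) ' ' = r.getD (i.toNat - 1) ' ' := by
        rw [PySem.List.pyGetD_eq_getElem r ' ' (by omega) (by omega),
            List.getD_eq_getElem r ' ' (by omega : i.toNat - 1 < r.length)]
        congr 1; omega
      refine ⟨by rw [← g0]; exact beq_iff_eq.mp h1, Or.inl ⟨by omega, ?_⟩⟩
      rw [← gm] at *
      simpa [pvBadLeft] using hbad
    · -- right-context violation
      simp only [decide_eq_true_eq] at h3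
      have gp : PySem.List.pyGetD r (i + 1) ' ' = r.getD (i.toNat + 1) ' ' := by
        rw [PySem.List.pyGetD_eq_getElem r ' ' (by omega) (by omega),
            List.getD_eq_getElem r ' ' (by omega : i.toNat + 1 < r.length)]
        congr 1; omega
      refine ⟨by rw [← g0]; exact beq_iff_eq.mp h1, Or.inr ⟨by omega, ?_, ?_⟩⟩
      · rw [← gp]; simpa using h4
      · rw [← gp]; simpa [pvBadRight] using h5
  · rintro ⟨he, hcase⟩
    unfold pvTrig
    rw [if_pos (beq_iff_eq.mpr (by rw [g0]; exact he))]
    rcases hcase with ⟨hi0, hbad⟩ | ⟨hi1, hne, hbad⟩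
    · have gm : PySem.List.pyGetD r (i - 1) ' ' = r.getD (i.toNat - 1) ' ' := by
        rw [PySem.List.pyGetD_eq_getElem r ' ' (by omega) (by omega),
            List.getD_eq_getElem r ' ' (by omega : i.toNat - 1 < r.length)]
        congr 1; omega
      rw [if_pos]
      simp only [Bool.and_eq_true, decide_eq_true_eq, gm]
      exact ⟨by omega, by simpa [pvBadLeft] using hbad⟩
    · have gp : PySem.List.pyGetD r (i + 1) ' ' = r.getD (i.toNat + 1) ' ' := by
        rw [PySem.List.pyGetD_eq_getElem r ' ' (by omega) (by omega),
            List.getD_eq_getElem r ' ' (by omega : i.toNat + 1 < r.length)]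
        congr 1; omega
      by_cases h2 : (decide (0 < i) &&
          (PySem.Chars.isdigit (PySem.List.pyGetD r (i - 1) ' ') ||
           PySem.List.pyGetD r (i - 1) ' ' == ')' || PySem.List.pyGetD r (i - 1) ' ' == 't' ||
           PySem.List.pyGetD r (i - 1) ' ' == 'e')) = true
      · rw [if_pos h2]
      · rw [if_neg h2, if_pos (by simp only [decide_eq_true_eq]; omega),
            if_neg (by rw [gp]; simpa using hne),
            if_pos (by rw [gp]; exact hbad)]

lemma pvAnyRange_iff (r : List Char) :
    ((PySem.List.pyRange 0 r.length 1).any (pvTrig r r.length) = true) ↔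
    (∃ k : Nat, k < r.length ∧ r.getD k ' ' = 'e' ∧
        ((0 < k ∧ pvBadLeft (r.getD (k - 1) ' ')) ∨
         (k + 1 < r.length ∧ r.getD (k + 1) ' ' ≠ '^' ∧ pvBadRight (r.getD (k + 1) ' ')))) := by
  rw [List.any_eq_true]
  constructor
  · rintro ⟨i, hmem, htrig⟩
    rw [PySem.List.mem_pyRange_one] at hmem
    obtain ⟨h0, hn⟩ := hmem
    exact ⟨i.toNat, by omega, (pvTrig_iff r i h0 hn).mp htrig⟩
  · rintro ⟨k, hk, hprop⟩
    refine ⟨(k : Int), by rw [PySem.List.mem_pyRange_one]; omega, ?_⟩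
    rw [pvTrig_iff r (k : Int) (by omega) (by omega)]
    simpa using hprop

lemma pvExists_iff (r : List Char) :
    (∃ k : Nat, k < r.length ∧ r.getD k ' ' = 'e' ∧
        ((0 < k ∧ pvBadLeft (r.getD (k - 1) ' ')) ∨
         (k + 1 < r.length ∧ r.getD (k + 1) ' ' ≠ '^' ∧ pvBadRight (r.getD (k + 1) ' ')))) ↔
    (∃ j : Nat, j + 1 < r.length ∧
        ((r.getD (j + 1) ' ' = 'e' ∧ pvBadLeft (r.getD j ' ')) ∨
         (r.getD j ' ' = 'e' ∧ pvBadRight (r.getD (j + 1) ' ')))) := by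
  constructor
  · rintro ⟨k, hk, he, hcase⟩
    rcases hcase with ⟨hk0, hbl⟩ | ⟨hk1, _, hbr⟩
    · exact ⟨k - 1, by omega, Or.inl ⟨by rw [Nat.sub_add_cancel hk0]; exact he, hbl⟩⟩
    · exact ⟨k, hk1, Or.inr ⟨he, hbr⟩⟩
  · rintro ⟨j, hj, hcase⟩
    rcases hcase with ⟨he, hbl⟩ | ⟨he, hbr⟩
    · exact ⟨j + 1, hj, he, Or.inl ⟨by omega, by simpa using hbl⟩⟩
    · exact ⟨j, by omega, he, Or.inr ⟨hj, pvBadRight_ne_caret hbr, hbr⟩⟩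

lemma pvAnyZip_iff (r : List Char) :
    ((r.zip r.tail).any
        (fun p => (p.2 == 'e' && pvBadLeft p.1) || (p.1 == 'e' && pvBadRight p.2)) = true) ↔
    (∃ j : Nat, j + 1 < r.length ∧
        ((r.getD (j + 1) ' ' = 'e' ∧ pvBadLeft (r.getD j ' ')) ∨
         (r.getD j ' ' = 'e' ∧ pvBadRight (r.getD (j + 1) ' ')))) := by
  rw [List.any_eq_true]
  constructor
  · rintro ⟨p, hmem, hp⟩
    obtain ⟨j, hj, hget⟩ := List.mem_iff_getElem.mp hmem
    have hjlen : j + 1 < r.length := by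
      have := hj; simp [List.length_zip, List.length_tail] at this; omega
    have h1 : p.1 = r[j]'(by omega) := by rw [← hget]; simp
    have h2 : p.2 = r[j + 1]'hjlen := by rw [← hget]; simp [List.getElem_tail]
    refine ⟨j, hjlen, ?_⟩
    rw [List.getD_eq_getElem r ' ' hjlen, List.getD_eq_getElem r ' ' (by omega : j < r.length)]
    simp only [Bool.or_eq_true, Bool.and_eq_true, beq_iff_eq] at hp
    rcases hp with ⟨hpe, hbl⟩ | ⟨hpe, hbr⟩
    · exact Or.inl ⟨by rw [← h2]; exact hpe, by rw [← h1]; exact hbl⟩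
    · exact Or.inr ⟨by rw [← h1]; exact hpe, by rw [← h2]; exact hbr⟩
  · rintro ⟨j, hj, hcase⟩
    have hzlen : j < (r.zip r.tail).length := by
      simp [List.length_zip, List.length_tail]; omega
    refine ⟨(r.zip r.tail)[j], List.getElem_mem hzlen, ?_⟩
    have h1 : (r.zip r.tail)[j].1 = r[j]'(by omega) := by simp
    have h2 : (r.zip r.tail)[j].2 = r[j + 1]'hj := by simp [List.getElem_tail]
    rw [List.getD_eq_getElem r ' ' hj, List.getD_eq_getElem r ' ' (by omega : j < r.length)] at hcase
    simp only [Bool.or_eq_true, Bool.and_eq_true, beq_iff_eq, h1, h2]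
    tauto

lemma pvZip_eq_noBad (l : List Char) :
    ((l.zip l.tail).any
        (fun p => (p.2 == 'e' && pvBadLeft p.1) || (p.1 == 'e' && pvBadRight p.2))) =
    !pvNoBad none l := by
  induction l with
  | nil => rfl
  | cons a t ih =>
    cases t with
    | nil => rfl
    | cons b t' =>
      have hnone : ∀ u : List Char, pvNoBad none u = match u with
          | [] => true
          | c :: s => pvNoBad (some c) s := by
        intro u; cases u <;> simp [pvNoBad, pvBadPair]
      simp only [List.tail_cons, List.zip_cons_cons, List.any_cons] at ih ⊢
      rw [ih]
      rw [hnone (a :: b :: t'), hnone (b :: t')]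
      simp only [pvNoBad, pvBadPair]
      cases h : ((b == 'e' && pvBadLeft a) || (a == 'e' && pvBadRight b)) <;> simp

-- A's function equals the pair-chain scan
lemma pvA_eq_noBad (r : List Char) :
    pvLoopA r r.length (PySem.List.pyRange 0 r.length 1) = pvNoBad none r := by
  rw [pvLoopA_eq_any]
  have : ((PySem.List.pyRange 0 r.length 1).any (pvTrig r r.length)) =
      ((r.zip r.tail).any
        (fun p => (p.2 == 'e' && pvBadLeft p.1) || (p.1 == 'e' && pvBadRight p.2))) := by
    rw [Bool.eq_iff_iff, pvAnyRange_iff, pvAnyZip_iff, ← pvExists_iff]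
  rw [this, pvZip_eq_noBad, Bool.not_not]

-- ---------- split bridge: PySem.Chars.splitOn _ ['e'] = List.splitOn 'e' ----------

lemma pvModifyHead_id (L : List (List Char)) :
    L.modifyHead (fun a => a) = L := by
  cases L <;> simp

lemma pvGo (fuel : Nat) (l cur : List Char) (acc : List (List Char)) (h : l.length ≤ fuel) :
    PySem.Chars.splitOn.go ['e'] fuel l cur acc =
      acc.reverse ++ (l.splitOn 'e').modifyHead (fun a => cur.reverse ++ a) := by
  induction fuel generalizing l cur acc with
  | zero =>
    have : l = [] := by cases l <;> simp_all
    subst this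
    simp [PySem.Chars.splitOn.go, List.splitOn, List.splitOnP_nil]
  | succ fuel ih =>
    cases l with
    | nil => simp [PySem.Chars.splitOn.go, List.splitOn, List.splitOnP_nil]
    | cons c rest =>
      simp only [PySem.Chars.splitOn.go]
      by_cases hc : c = 'e'
      · subst hc
        rw [if_pos (by simp [List.isPrefixOf])]
        simp only [List.length_cons, List.length_nil, List.drop_succ_cons, List.drop_zero]
        rw [ih rest [] (cur.reverse :: acc) (by simpa using h)]
        simp [List.splitOn, List.splitOnP_cons, pvModifyHead_id]
      · rw [if_neg (by simp [List.isPrefixOf]; exact fun h' => hc h'.symm)]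
        rw [ih rest (c :: cur) acc (by simpa using h)]
        simp only [List.splitOn, List.splitOnP_cons, beq_iff_eq, if_neg hc,
          List.modifyHead_modifyHead]
        have hfun : (fun a => (c :: cur).reverse ++ a) =
            ((fun a : List Char => cur.reverse ++ a) ∘ List.cons c) := by
          funext a; simp
        rw [hfun]

lemma pvSplitOn_eq (l : List Char) :
    PySem.Chars.splitOn l ['e'] = l.splitOn 'e' := by
  rw [PySem.Chars.splitOn, pvGo (l.length + 1) l [] [] (by omega)]
  simp [pvModifyHead_id]

lemma pvEfree (l : List Char) : ∀ q ∈ l.splitOn 'e', ∀ c ∈ q, c ≠ 'e' := by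
  induction l with
  | nil => simp [List.splitOn, List.splitOnP_nil]
  | cons a t ih =>
    by_cases ha : a = 'e'
    · subst ha
      simp only [List.splitOn, List.splitOnP_cons, beq_self_eq_true, if_true] at *
      intro q hq
      rcases List.mem_cons.mp hq with rfl | hq
      · simp
      · exact ih q hq
    · simp only [List.splitOn, List.splitOnP_cons, beq_iff_eq, if_neg ha] at *
      obtain ⟨h0, tl0, hd⟩ := List.exists_cons_of_ne_nil (List.splitOnP_ne_nil (· == 'e') t)
      rw [hd]
      intro q hq
      rcases List.mem_cons.mp hq with rfl | hq
      · intro c hc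
        rcases List.mem_cons.mp hc with rfl | hc
        · exact ha
        · exact ih h0 (hd ▸ List.mem_cons_self) c hc
      · exact ih q (hd ▸ List.mem_cons_of_mem _ hq)

lemma pvInter (ps : List (List Char)) (p : List Char) :
    [('e' : Char)].intercalate (p :: ps) = p ++ pvInterE ps := by
  induction ps generalizing p with
  | nil => simp [List.intercalate, pvInterE]
  | cons q qs ih =>
    have : [('e' : Char)].intercalate (p :: q :: qs) =
        p ++ 'e' :: [('e' : Char)].intercalate (q :: qs) := by
      simp [List.intercalate, List.intersperse]
    rw [this, ih q]
    simp [pvInterE]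

-- ---------- segment-scan lemmas ----------

lemma pvNoBad_efree (p : List Char) (hp : ∀ c ∈ p, c ≠ 'e') (prev : Option Char)
    (hprev : prev = none ∨ ∃ a, prev = some a ∧ a ≠ 'e') : pvNoBad prev p = true := by
  induction p generalizing prev with
  | nil => rfl
  | cons c t ih =>
    have hc : c ≠ 'e' := hp c List.mem_cons_self
    have hpair : pvBadPair prev c = false := by
      rcases hprev with rfl | ⟨a, rfl, ha⟩
      · rfl
      · simp [pvBadPair, hc, ha]
    simp only [pvNoBad, hpair, Bool.not_false, Bool.true_and]
    exact ih (fun d hd => hp d (List.mem_cons_of_mem _ hd)) (some c) (Or.inr ⟨c, rfl, hc⟩)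

lemma pvS2 (p : List Char) (hp : ∀ c ∈ p, c ≠ 'e') (prev : Option Char) (rest : List Char) :
    pvNoBad prev (p ++ 'e' :: rest) =
      (!pvBadPair prev (p.headD 'e') && (!pvLastBad p && pvNoBad (some 'e') rest)) := by
  induction p generalizing prev with
  | nil => simp [pvNoBad, pvLastBad]
  | cons c t ih =>
    have hc : c ≠ 'e' := hp c List.mem_cons_self
    simp only [List.cons_append, pvNoBad, List.headD_cons]
    rw [ih (fun d hd => hp d (List.mem_cons_of_mem _ hd)) (some c)]
    cases t with
    | nil =>
      have : pvBadPair (some c) (([] : List Char).headD 'e') = pvBadLeft c := by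
        simp [pvBadPair, hc]
      rw [this]
      simp [pvLastBad]
    | cons d t' =>
      have hd : d ≠ 'e' := hp d (List.mem_cons_of_mem _ List.mem_cons_self)
      have : pvBadPair (some c) ((d :: t').headD 'e') = false := by
        simp [pvBadPair, hc, hd]
      rw [this]
      have : pvLastBad (c :: d :: t') = pvLastBad (d :: t') := by
        simp [pvLastBad, List.getLast?_cons_cons]
      rw [this]
      simp

lemma pvBadPair_e_right (c : Char) (hc : c ≠ 'e') :
    pvBadPair (some 'e') c = (c != '^' && (PySem.Chars.isdigit c || c == 't')) := by
  by_cases h : c = '^'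
  · subst h; decide
  · simp only [pvBadPair, pvBadRight]
    have h1 : (c == 'e') = false := by simp [hc]
    have h2 : (c != '^') = true := by simp [bne, h]
    simp [h1, h2]

lemma pvS3 (p : List Char) (hp : ∀ c ∈ p, c ≠ 'e') :
    pvNoBad (some 'e') p = !pvRightBadSeg p false := by
  cases p with
  | nil => rfl
  | cons c t =>
    have hc : c ≠ 'e' := hp c List.mem_cons_self
    simp only [pvNoBad, pvRightBadSeg, List.head?_cons]
    rw [pvBadPair_e_right c hc,
        pvNoBad_efree t (fun d hd => hp d (List.mem_cons_of_mem _ hd)) (some c)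
          (Or.inr ⟨c, rfl, hc⟩)]
    simp

lemma pvLeftBadSeg_ne_nil (p : List Char) (hne : p ≠ []) (b b' : Bool) :
    pvLeftBadSeg p b = pvLeftBadSeg p b' := by
  obtain ⟨c, hc⟩ := Option.isSome_iff_exists.mp (List.getLast?_isSome.mpr hne)
  simp [pvLeftBadSeg, hc]

lemma pvLastBad_eq_leftBad (p : List Char) (hp : ∀ c ∈ p, c ≠ 'e') (hne : p ≠ []) :
    pvLastBad p = pvLeftBadSeg p false := by
  obtain ⟨c, hc⟩ := List.getLast?_isSome.mpr hne |> Option.isSome_iff_exists.mp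
  have hmem : c ∈ p := List.mem_of_getLast? hc
  simp [pvLastBad, pvLeftBadSeg, hc, pvBadLeft, hp c hmem]

lemma pvHeadPair_eq_rightBad (p : List Char) (hp : ∀ c ∈ p, c ≠ 'e') :
    pvBadPair (some 'e') (p.headD 'e') = pvRightBadSeg p true := by
  cases p with
  | nil => decide
  | cons c t =>
    have hc : c ≠ 'e' := hp c List.mem_cons_self
    simp only [List.headD_cons, pvRightBadSeg, List.head?_cons]
    exact pvBadPair_e_right c hc

lemma pvMain (ps : List (List Char)) (hps : ∀ q ∈ ps, ∀ c ∈ q, c ≠ 'e')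
    (p : List Char) (hp : ∀ c ∈ p, c ≠ 'e') :
    pvNoBad (some 'e') (p ++ pvInterE ps) =
      (!pvRightBadSeg p (!ps.isEmpty) && pvOkB p ps false) := by
  induction ps generalizing p with
  | nil => simp [pvInterE, pvOkB, pvS3 p hp]
  | cons q qs ih =>
    simp only [pvInterE]
    rw [pvS2 p hp (some 'e') (q ++ pvInterE qs),
        ih (fun u hu => hps u (List.mem_cons_of_mem _ hu)) q
          (hps q List.mem_cons_self)]
    simp only [pvOkB, List.isEmpty_cons, Bool.not_false]
    rw [pvHeadPair_eq_rightBad p hp]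
    cases hpe : p with
    | nil => simp [pvRightBadSeg, pvLastBad, pvLeftBadSeg]
    | cons c t =>
      rw [← hpe, pvLastBad_eq_leftBad p hp (hpe ▸ List.cons_ne_nil c t)]
      cases pvRightBadSeg p true <;> cases pvLeftBadSeg p false <;>
        cases pvRightBadSeg q (!qs.isEmpty) <;> simp

lemma pvTop (ps : List (List Char)) (hps : ∀ q ∈ ps, ∀ c ∈ q, c ≠ 'e')
    (p : List Char) (hp : ∀ c ∈ p, c ≠ 'e') :
    pvNoBad none (p ++ pvInterE ps) = pvOkB p ps true := by
  cases ps with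
  | nil =>
    simp only [pvInterE, List.append_nil, pvOkB]
    exact pvNoBad_efree p hp none (Or.inl rfl)
  | cons q qs =>
    simp only [pvInterE]
    rw [pvS2 p hp none (q ++ pvInterE qs),
        pvMain qs (fun u hu => hps u (List.mem_cons_of_mem _ hu)) q
          (hps q List.mem_cons_self)]
    simp only [pvOkB, Bool.not_false, pvBadPair, Bool.true_and]
    cases hpe : p with
    | nil => simp [pvLastBad, pvLeftBadSeg]
    | cons c t =>
      rw [← hpe, pvLastBad_eq_leftBad p hp (hpe ▸ List.cons_ne_nil c t),
          pvLeftBadSeg_ne_nil p (hpe ▸ List.cons_ne_nil c t) false true]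
      simp [Bool.and_assoc]

-- ===== VERDICT (by name: the statement is the Claim_ definition above) =====
theorem check_e_usage_spec : Claim_equal_check_e_usage := by
  intro rumus _
  unfold Spec_check_e_usage
  simp only [check_e_usage, check_e_usage_alt]
  rw [pvA_eq_noBad, pvSplitOn_eq]
  set r := (PySem.Str.replace rumus " " "").toList with hr
  obtain ⟨p, ps, hpp⟩ := List.exists_cons_of_ne_nil (List.splitOnP_ne_nil (· == 'e') r)
  have hsplit : r.splitOn 'e' = p :: ps := hpp
  have hfree := pvEfree r
  rw [hsplit] at hfree
  have hrdec : r = p ++ pvInterE ps := by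
    conv_lhs => rw [← List.intercalate_splitOn r 'e', hsplit, pvInter]
  rw [hsplit]
  simp only [List.headD_cons, List.tail_cons]
  rw [hrdec]
  exact pvTop ps (fun q hq => hfree q (List.mem_cons_of_mem _ hq)) p
    (hfree p List.mem_cons_self)
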